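-- pv_equiv track=rewrite | github.com/djjkelly/Advent-of-Code | 2023/2023_Day14_Part2.py | count_total
-- ===== SOURCE A (Python) =====
-- def count_total(list_of_strings):
--     total = 0
--     length = len(list_of_strings)
--     for line_no,line in enumerate(list_of_strings):
--         for char in line:
--             if char == 'O':
--                 total += (length - line_no)
--     return total
-- ===== SOURCE B (Python) =====
-- def count_total(list_of_strings):
--     running = 0
--     total = 0
--     for line in list_of_strings:
--         running += line.count('O')
--         total += running
--     return total
-- ===== Notes on version B (the rewrite author's own statement) =====
-- stated objective: simpler
-- what changed: Replaces the index/weight computation (length - line_no per 'O' in a char loop) by a prefix-sum accumulator: each row adds its 'O'-count to a running counter which is added to the total, using the identity sum_r c_r*(L-r) = sum_j sum_{r<=j} c_r; no enumerate, no len, no per-character weighted addition.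
import Mathlib
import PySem

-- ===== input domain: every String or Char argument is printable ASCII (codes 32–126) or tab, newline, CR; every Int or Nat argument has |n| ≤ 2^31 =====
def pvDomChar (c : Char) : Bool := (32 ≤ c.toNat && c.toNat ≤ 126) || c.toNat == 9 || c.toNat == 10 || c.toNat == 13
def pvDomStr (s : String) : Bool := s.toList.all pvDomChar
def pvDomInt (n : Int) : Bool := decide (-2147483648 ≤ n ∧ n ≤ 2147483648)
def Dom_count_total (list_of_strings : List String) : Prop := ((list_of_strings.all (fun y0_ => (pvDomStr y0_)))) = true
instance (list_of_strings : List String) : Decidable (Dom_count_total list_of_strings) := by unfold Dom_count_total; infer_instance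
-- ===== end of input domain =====

-- B replaces A's per-'O' weight (length - line_no) by a running prefix-sum of row counts ('simpler': no index or length arithmetic).

-- ===== PORT A =====
def count_total (list_of_strings : List String) : Int :=
  let total : Int := 0
  let length : Int := list_of_strings.length
  (PySem.List.enumerate list_of_strings).foldl
    (fun total p =>
      p.2.toList.foldl
        (fun total char => if char == 'O' then total + (length - p.1) else total)
        total)
    total

-- ===== PORT B =====
def count_total_alt (list_of_strings : List String) : Int :=
  let st : Int × Int :=
    list_of_strings.foldl
      (fun st line =>
        let running := st.1 + (PySem.Str.count line "O" : Int)
        (running, st.2 + running))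
      (0, 0)
  st.2

-- ===== PRECONDITION & SPEC =====
def Spec_count_total (list_of_strings : List String) (out : Int) : Prop := out = count_total_alt list_of_strings
instance (list_of_strings : List String) (out : Int) : Decidable (Spec_count_total list_of_strings out) := by unfold Spec_count_total; infer_instance

-- ===== CLAIM (what is proved, stated in full; the proofs are below) =====
def Claim_equal_count_total : Prop := ∀ (list_of_strings : List String), Dom_count_total list_of_strings → Spec_count_total list_of_strings (count_total list_of_strings)

-- ===== LEMMAS AND PROOFS =====

-- Python's s.count('O') for a one-character needle is the plain character count.
theorem chars_count_go_single (c : Char) :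
    ∀ (l : List Char) (fuel acc : Nat), l.length ≤ fuel →
      PySem.Chars.count.go [c] fuel l acc = acc + l.count c := by
  intro l
  induction l with
  | nil =>
      intro fuel acc _
      cases fuel <;> simp [PySem.Chars.count.go]
  | cons h t ih =>
      intro fuel acc hle
      cases fuel with
      | zero => simp at hle
      | succ fuel =>
          by_cases hc : h = c
          · subst hc
            have : PySem.Chars.count.go [h] (fuel + 1) (h :: t) acc
                = PySem.Chars.count.go [h] fuel t (acc + 1) := by
              simp [PySem.Chars.count.go, List.isPrefixOf]
            rw [this, ih fuel (acc + 1) (by simpa using hle)]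
            simp [List.count_cons]
            omega
          · have : PySem.Chars.count.go [c] (fuel + 1) (h :: t) acc
                = PySem.Chars.count.go [c] fuel t acc := by
              simp [PySem.Chars.count.go, List.isPrefixOf, Ne.symm hc]
            rw [this, ih fuel acc (by simpa using hle)]
            simp [List.count_cons, Ne.symm hc, hc]

theorem chars_count_single (l : List Char) (c : Char) :
    PySem.Chars.count l [c] = l.count c := by
  simpa using chars_count_go_single c l l.length 0 le_rfl

-- counts of 'O' per row, and the weighted reference sum: wsum rows L = Σ_i c_i · (L - i)
def rowCount (s : String) : Int := (s.toList.count 'O' : Int)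

def wsum : List String → Int → Int
  | [], _ => 0
  | x :: xs, L => rowCount x * L + wsum xs (L - 1)

-- A's inner character loop adds the constant weight once per 'O'.
theorem inner_loop_eq (l : List Char) :
    ∀ (w t0 : Int),
      l.foldl (fun t c => if c == 'O' then t + w else t) t0
        = t0 + (l.count 'O' : Int) * w := by
  induction l with
  | nil => intro w t0; simp
  | cons h t ih =>
      intro w t0
      rw [List.foldl_cons, ih]
      by_cases hc : h = 'O'
      · simp [hc, List.count_cons]
        push_cast
        ring
      · simp [hc, List.count_cons]

-- A's outer loop over enumerate equals the weighted reference sum.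
theorem a_fold_eq (L : Int) :
    ∀ (xs : List String) (s t : Int),
      (PySem.List.enumerate xs s).foldl
        (fun total p =>
          p.2.toList.foldl
            (fun total char => if char == 'O' then total + (L - p.1) else total)
            total)
        t
      = t + wsum xs (L - s) := by
  intro xs
  induction xs with
  | nil => intro s t; simp [PySem.List.enumerate_nil, wsum]
  | cons x xs ih =>
      intro s t
      rw [PySem.List.enumerate_cons, List.foldl_cons, inner_loop_eq, ih (s + 1)]
      simp [wsum, rowCount]
      ring

-- B's prefix-sum loop equals the same weighted reference sum.
theorem b_fold_eq :
    ∀ (xs : List String) (r t : Int),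
      (xs.foldl
        (fun (st : Int × Int) line =>
          let running := st.1 + (PySem.Str.count line "O" : Int)
          (running, st.2 + running))
        (r, t)).2
      = t + r * xs.length + wsum xs xs.length := by
  intro xs
  induction xs with
  | nil => intro r t; simp [wsum]
  | cons x xs ih =>
      intro r t
      rw [List.foldl_cons]
      simp only []
      rw [ih]
      simp [wsum, PySem.Str.count_eq, chars_count_single, rowCount]
      push_cast
      ring

-- ===== VERDICT (by name: the statement is the Claim_ definition above) =====
theorem count_total_spec : Claim_equal_count_total := by
  intro xs _
  unfold Spec_count_total count_total count_total_alt
  simp only []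
  rw [a_fold_eq, b_fold_eq]
  simp
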